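-- pv_equiv track=rewrite | github.com/yguo005/medgemma_chatbot | app/conversation_manager.py | _extract_symptom_type
-- ===== SOURCE A (Python) =====
-- def _extract_symptom_type(symptoms: str) -> str:
--     """Extract the main symptom type from description"""
--     symptoms_lower = symptoms.lower()
--
--     if 'pain' in symptoms_lower:
--         if any(word in symptoms_lower for word in ['knee', 'leg', 'joint']):
--             return 'knee pain'
--         elif any(word in symptoms_lower for word in ['head', 'headache']):
--             return 'headache'
--         elif any(word in symptoms_lower for word in ['back']):
--             return 'back pain'
--         else:
--             return 'pain'
--     elif any(word in symptoms_lower for word in ['swelling', 'swollen']):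
--         return 'swelling'
--     elif any(word in symptoms_lower for word in ['rash', 'skin']):
--         return 'skin condition'
--     else:
--         return 'symptoms'
-- ===== SOURCE B (Python) =====
-- KEYWORDS = ('pain', 'knee', 'leg', 'joint', 'head', 'back',
--             'swelling', 'swollen', 'rash', 'skin')
--
-- def _extract_symptom_type(symptoms: str) -> str:
--     """Single scan over text positions collecting every keyword found,
--     then classify from the flag set ('headache' in text implies 'head')."""
--     sl = symptoms.lower()
--     found = set()
--     for i in range(len(sl) + 1):
--         for w in KEYWORDS:
--             if sl.startswith(w, i):
--                 found.add(w)
--     if 'pain' in found: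
--         if 'knee' in found or 'leg' in found or 'joint' in found:
--             return 'knee pain'
--         if 'head' in found:
--             return 'headache'
--         if 'back' in found:
--             return 'back pain'
--         return 'pain'
--     if 'swelling' in found or 'swollen' in found:
--         return 'swelling'
--     if 'rash' in found or 'skin' in found:
--         return 'skin condition'
--     return 'symptoms'
-- ===== Notes on version B (the rewrite author's own statement) =====
-- stated objective: alternative
-- what changed: Replaces per-keyword substring searches in a nested if/elif chain with a single scan over the text's positions that builds the set of all keywords occurring, then classifies from those precomputed flags (the 'headache' test collapses into the 'head' flag).
import Mathlib
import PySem

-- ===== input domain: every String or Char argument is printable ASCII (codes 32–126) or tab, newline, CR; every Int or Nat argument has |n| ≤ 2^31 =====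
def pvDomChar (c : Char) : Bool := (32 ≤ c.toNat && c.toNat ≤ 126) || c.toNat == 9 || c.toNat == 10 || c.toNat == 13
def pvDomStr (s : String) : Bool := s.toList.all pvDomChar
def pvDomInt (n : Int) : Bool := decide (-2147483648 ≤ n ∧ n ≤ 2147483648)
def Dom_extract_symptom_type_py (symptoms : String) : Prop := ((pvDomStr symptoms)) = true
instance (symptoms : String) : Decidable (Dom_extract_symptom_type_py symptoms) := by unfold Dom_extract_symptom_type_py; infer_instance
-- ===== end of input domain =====

-- B replaces the per-keyword substring searches of A's if/elif chain by ONE scan over the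
-- text's positions collecting the set of keywords that occur, then classifies from those flags.

-- ===== PORT A =====
def extract_symptom_type_py (symptoms : String) : String :=
  let sl := PySem.Str.lower symptoms
  if PySem.Str.isIn "pain" sl then
    if ["knee", "leg", "joint"].any (fun w => PySem.Str.isIn w sl) then "knee pain"
    else if ["head", "headache"].any (fun w => PySem.Str.isIn w sl) then "headache"
    else if ["back"].any (fun w => PySem.Str.isIn w sl) then "back pain"
    else "pain"
  else if ["swelling", "swollen"].any (fun w => PySem.Str.isIn w sl) then "swelling"
  else if ["rash", "skin"].any (fun w => PySem.Str.isIn w sl) then "skin condition"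
  else "symptoms"

-- ===== PORT B =====
-- the module constant KEYWORDS of Source B
def pvKeywords : List String :=
  ["pain", "knee", "leg", "joint", "head", "back", "swelling", "swollen", "rash", "skin"]

-- the double loop of Source B: for i in range(len(sl)+1): for w in KEYWORDS: if sl.startswith(w, i): found.add(w)
-- (sl.startswith(w, i) with 0 ≤ i ≤ len(sl) is exactly: w.toList is a prefix of (sl.toList).drop i)
def pvScan (cs : List Char) : PySem.Set String :=
  (List.range (cs.length + 1)).foldl
    (fun acc i =>
      pvKeywords.foldl
        (fun a w => if PySem.Chars.startswith (cs.drop i) w.toList then PySem.Set.add a w else a)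
        acc)
    PySem.Set.empty

def extract_symptom_type_py_alt (symptoms : String) : String :=
  let found := pvScan (PySem.Str.lower symptoms).toList
  if found.contains "pain" then
    if found.contains "knee" || found.contains "leg" || found.contains "joint" then "knee pain"
    else if found.contains "head" then "headache"
    else if found.contains "back" then "back pain"
    else "pain"
  else if found.contains "swelling" || found.contains "swollen" then "swelling"
  else if found.contains "rash" || found.contains "skin" then "skin condition"
  else "symptoms"

-- ===== PRECONDITION & SPEC =====
def Spec_extract_symptom_type_py (symptoms : String) (out : String) : Prop := out = extract_symptom_type_py_alt symptoms
instance (symptoms : String) (out : String) : Decidable (Spec_extract_symptom_type_py symptoms out) := by unfold Spec_extract_symptom_type_py; infer_instance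

-- ===== CLAIM (what is proved, stated in full; the proofs are below) =====
def Claim_equal_extract_symptom_type_py : Prop := ∀ (symptoms : String), Dom_extract_symptom_type_py symptoms → Spec_extract_symptom_type_py symptoms (extract_symptom_type_py symptoms)

-- ===== LEMMAS AND PROOFS =====

-- membership in the inner fold over keywords
lemma mem_inner (cs : List Char) (ws : List String) (acc : PySem.Set String) (y : String) :
    y ∈ ws.foldl (fun a w => if PySem.Chars.startswith cs w.toList then PySem.Set.add a w else a) acc ↔
      y ∈ acc ∨ (y ∈ ws ∧ PySem.Chars.startswith cs y.toList = true) := by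
  induction ws generalizing acc with
  | nil => simp
  | cons w ws ih =>
    simp only [List.foldl_cons, List.mem_cons]
    rw [ih]
    by_cases h : PySem.Chars.startswith cs w.toList = true
    · rw [if_pos h]
      rw [PySem.Set.mem_add]
      constructor
      · rintro ((hy | rfl) | ⟨hm, hs⟩)
        · exact Or.inl hy
        · exact Or.inr ⟨Or.inl rfl, h⟩
        · exact Or.inr ⟨Or.inr hm, hs⟩
      · rintro (hy | ⟨(rfl | hm), hs⟩)
        · exact Or.inl (Or.inl hy)
        · exact Or.inl (Or.inr rfl)
        · exact Or.inr ⟨hm, hs⟩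
    · rw [if_neg h]
      constructor
      · rintro (hy | ⟨hm, hs⟩)
        · exact Or.inl hy
        · exact Or.inr ⟨Or.inr hm, hs⟩
      · rintro (hy | ⟨(rfl | hm), hs⟩)
        · exact Or.inl hy
        · exact absurd hs h
        · exact Or.inr ⟨hm, hs⟩

-- membership in the outer fold over positions
lemma mem_outer (cs : List Char) (is : List Nat) (acc : PySem.Set String) (y : String) :
    y ∈ is.foldl
        (fun acc i =>
          pvKeywords.foldl
            (fun a w => if PySem.Chars.startswith (cs.drop i) w.toList then PySem.Set.add a w else a)
            acc)
        acc ↔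
      y ∈ acc ∨ ∃ i ∈ is, y ∈ pvKeywords ∧ PySem.Chars.startswith (cs.drop i) y.toList = true := by
  induction is generalizing acc with
  | nil => simp
  | cons i is ih =>
    simp only [List.foldl_cons, List.mem_cons]
    rw [ih, mem_inner]
    constructor
    · rintro ((hy | ⟨hm, hs⟩) | ⟨j, hj, hm, hs⟩)
      · exact Or.inl hy
      · exact Or.inr ⟨i, Or.inl rfl, hm, hs⟩
      · exact Or.inr ⟨j, Or.inr hj, hm, hs⟩
    · rintro (hy | ⟨j, (rfl | hj), hm, hs⟩)
      · exact Or.inl (Or.inl hy)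
      · exact Or.inl (Or.inr ⟨hm, hs⟩)
      · exact Or.inr ⟨j, hj, hm, hs⟩

lemma mem_pvScan (cs : List Char) (y : String) :
    y ∈ pvScan cs ↔ y ∈ pvKeywords ∧ PySem.Chars.isIn y.toList cs = true := by
  unfold pvScan
  rw [mem_outer]
  simp only [PySem.Set.empty, List.not_mem_nil, false_or, List.mem_range]
  constructor
  · rintro ⟨i, _, hm, hs⟩
    refine ⟨hm, (PySem.Chars.exists_prefix_drop_iff_isIn _ _).mp ⟨i, (PySem.Chars.startswith_iff _ _).mp hs⟩⟩
  · rintro ⟨hm, hin⟩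
    obtain ⟨j, hj⟩ := (PySem.Chars.exists_prefix_drop_iff_isIn _ _).mpr hin
    refine ⟨min j cs.length, by omega, hm, (PySem.Chars.startswith_iff _ _).mpr ?_⟩
    by_cases h : j ≤ cs.length
    · simpa [Nat.min_eq_left h] using hj
    · have h1 : cs.drop j = [] := List.drop_eq_nil_of_le (by omega)
      have h2 : cs.drop (min j cs.length) = [] := List.drop_eq_nil_of_le (by omega)
      rw [h2]; rw [h1] at hj; exact hj

lemma contains_pvScan (s : String) (w : String) (hw : w ∈ pvKeywords) :
    (pvScan s.toList).contains w = PySem.Str.isIn w s := by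
  cases hb : PySem.Str.isIn w s with
  | true =>
    exact (PySem.Set.contains_iff _ _).mpr ((mem_pvScan _ _).mpr
      ⟨hw, (PySem.Chars.isIn_iff_infix _ _).mpr ((PySem.Str.isIn_iff_infix _ _).mp hb)⟩)
  | false =>
    rw [Bool.eq_false_iff]
    intro hc
    have := ((mem_pvScan _ _).mp ((PySem.Set.contains_iff _ _).mp hc)).2
    have := (PySem.Str.isIn_iff_infix _ _).mpr ((PySem.Chars.isIn_iff_infix _ _).mp this)
    rw [hb] at this
    exact Bool.false_ne_true this

-- 'headache' in sl implies 'head' in sl, so A's second test equals the 'head' flag alone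
lemma head_or_headache (sl : String) :
    (PySem.Str.isIn "head" sl || PySem.Str.isIn "headache" sl) = PySem.Str.isIn "head" sl := by
  cases h2 : PySem.Str.isIn "headache" sl with
  | false => simp
  | true =>
    have hinf : ("head".toList) <:+: sl.toList :=
      List.IsInfix.trans (l₂ := "headache".toList) (by decide) ((PySem.Str.isIn_iff_infix _ _).mp h2)
    simp only [Bool.or_true]
    exact ((PySem.Str.isIn_iff_infix _ _).mpr hinf).symm


-- ===== VERDICT (by name: the statement is the Claim_ definition above) =====
theorem extract_symptom_type_py_spec : Claim_equal_extract_symptom_type_py := by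
  intro s _
  unfold Spec_extract_symptom_type_py extract_symptom_type_py extract_symptom_type_py_alt
  simp only [List.any_cons, List.any_nil, Bool.or_false]
  rw [contains_pvScan _ "pain" (by decide), contains_pvScan _ "knee" (by decide),
      contains_pvScan _ "leg" (by decide), contains_pvScan _ "joint" (by decide),
      contains_pvScan _ "head" (by decide), contains_pvScan _ "back" (by decide),
      contains_pvScan _ "swelling" (by decide), contains_pvScan _ "swollen" (by decide),
      contains_pvScan _ "rash" (by decide), contains_pvScan _ "skin" (by decide),
      head_or_headache, Bool.or_assoc]
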